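-- pv_equiv track=rewrite | github.com/dcheng2022/advent_of_code_2023 | day3.py | get_num_and_y_loc
-- ===== SOURCE A (Python) =====
-- def get_num_and_y_loc(char_row, j):
--     ptr_go_left = j
--     ptr_go_right = j
--
--     while ptr_go_left > 0 and char_row[ptr_go_left - 1].isdigit():
--         ptr_go_left -= 1
--
--     while ptr_go_right < len(char_row) - 1 and char_row[ptr_go_right + 1].isdigit():
--         ptr_go_right += 1
--
--     return (int(char_row[ptr_go_left:ptr_go_right + 1]), ptr_go_left)
-- ===== SOURCE B (Python) =====
-- def get_num_and_y_loc(char_row, j):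
--     # Tokenise: collect every maximal digit run, then select the run covering j.
--     runs = []
--     start = None
--     for i, ch in enumerate(char_row):
--         if ch.isdigit():
--             if start is None:
--                 start = i
--         elif start is not None:
--             runs.append((start, i))
--             start = None
--     if start is not None:
--         runs.append((start, len(char_row)))
--     for start, end in runs:
--         if start <= j < end:
--             return (int(char_row[start:end]), start)
--     raise ValueError("no number covers index %r" % (j,))
-- ===== Notes on version B (the rewrite author's own statement) =====
-- stated objective: alternative
-- what changed: Replaces the two-pointer expansion outward from j with a single left-to-right tokenising pass that collects all maximal digit runs and then selects the run covering j.
-- outside the precondition, e.g. on get_num_and_y_loc('+12', 0): A returns (12, 0), B raises ValueError; on get_num_and_y_loc('12', -1): A returns (2, -1), B raises ValueError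
import Mathlib
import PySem

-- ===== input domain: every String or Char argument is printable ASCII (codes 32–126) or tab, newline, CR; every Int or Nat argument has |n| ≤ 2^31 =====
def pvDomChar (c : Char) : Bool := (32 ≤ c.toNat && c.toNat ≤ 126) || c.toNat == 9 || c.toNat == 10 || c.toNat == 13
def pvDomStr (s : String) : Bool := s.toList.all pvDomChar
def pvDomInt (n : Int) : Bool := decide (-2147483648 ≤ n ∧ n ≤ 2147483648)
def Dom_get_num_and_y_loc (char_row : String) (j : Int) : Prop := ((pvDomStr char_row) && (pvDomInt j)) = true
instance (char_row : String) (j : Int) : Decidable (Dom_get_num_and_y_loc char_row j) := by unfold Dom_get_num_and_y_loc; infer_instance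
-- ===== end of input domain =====

-- B tokenises the row into maximal digit runs in one pass and selects the run covering j,
-- instead of A's two-pointer expansion outward from j; equal return value on Pre_.

-- ===== PORT A =====
-- while ptr_go_left > 0 and char_row[ptr_go_left - 1].isdigit(): ptr_go_left -= 1
-- (an out-of-range index, IndexError in Python, stops the loop here; such inputs are outside Pre_)
def pvGoLeft (cs : List Char) (ptr : Int) : Int :=
  if h : ptr > 0 ∧ ((PySem.List.pyGet? cs (ptr - 1)).map Char.isDigit).getD false = true then
    pvGoLeft cs (ptr - 1)
  else ptr
termination_by ptr.toNat
decreasing_by omega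

-- while ptr_go_right < len(char_row) - 1 and char_row[ptr_go_right + 1].isdigit(): ptr_go_right += 1
def pvGoRight (cs : List Char) (ptr : Int) : Int :=
  if h : ptr < (cs.length : Int) - 1 ∧ ((PySem.List.pyGet? cs (ptr + 1)).map Char.isDigit).getD false = true then
    pvGoRight cs (ptr + 1)
  else ptr
termination_by ((cs.length : Int) - 1 - ptr).toNat
decreasing_by omega

-- int(char_row[ptr_go_left:ptr_go_right + 1]): where Python's int() raises ValueError the
-- port returns 0 via getD — those inputs are excluded by Pre_.
def get_num_and_y_loc (char_row : String) (j : Int) : Int × Int :=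
  let cs := char_row.toList
  let l := pvGoLeft cs j
  let r := pvGoRight cs j
  ((PySem.Int.ofChars? (PySem.List.slice cs (some l) (some (r + 1)))).getD 0, l)

-- ===== PORT B =====
-- the tokenising for-loop of Source B: running index i, open-run start, runs emitted in order
def pvCollectRuns (cs : List Char) (i : Nat) (start : Option Nat) : List (Nat × Nat) :=
  match cs with
  | [] => match start with | some s => [(s, i)] | none => []
  | c :: rest =>
    if c.isDigit then
      match start with
      | none => pvCollectRuns rest (i + 1) (some i)
      | some _ => pvCollectRuns rest (i + 1) start
    else
      match start with
      | some s => (s, i) :: pvCollectRuns rest (i + 1) none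
      | none => pvCollectRuns rest (i + 1) none

-- the selection loop: first run (start, end) with start <= j < end
def pvFindRun : List (Nat × Nat) → Int → Option (Nat × Nat)
  | [], _ => none
  | (s, e) :: rest, j =>
    if (s : Int) ≤ j ∧ j < (e : Int) then some (s, e) else pvFindRun rest j

-- Source B raises ValueError when no run covers j; the port returns (0, 0) there — outside Pre_.
def get_num_and_y_loc_alt (char_row : String) (j : Int) : Int × Int :=
  let cs := char_row.toList
  match pvFindRun (pvCollectRuns cs 0 none) j with
  | some (s, e) => ((PySem.Int.ofChars? (PySem.List.slice cs (some (s : Int)) (some (e : Int)))).getD 0, (s : Int))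
  | none => (0, 0)

-- ===== PRECONDITION & SPEC =====
-- Pre_ admits exactly the in-range positions that sit on a digit; excluded are the inputs where
-- A raises (ValueError on a non-numeric slice, IndexError) together with the corner artefacts of
-- A's slicing where it still returns (a sign/space glued onto the number, negative-index wraparound),
-- on which B's token scan finds no covering run and raises ValueError.
def Pre_get_num_and_y_loc (char_row : String) (j : Int) : Prop :=
  0 ≤ j ∧ j < (char_row.toList.length : Int) ∧ (char_row.toList.getD j.toNat ' ').isDigit = true
instance (char_row : String) (j : Int) : Decidable (Pre_get_num_and_y_loc char_row j) := by
  unfold Pre_get_num_and_y_loc; infer_instance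

def pvWitness_get_num_and_y_loc : String × Int := ("a12", 1)

def Spec_get_num_and_y_loc (char_row : String) (j : Int) (out : Int × Int) : Prop := out = get_num_and_y_loc_alt char_row j
instance (char_row : String) (j : Int) (out : Int × Int) : Decidable (Spec_get_num_and_y_loc char_row j out) := by unfold Spec_get_num_and_y_loc; infer_instance

-- ===== CLAIM (what is proved, stated in full; the proofs are below) =====
def Claim_equal_get_num_and_y_loc : Prop := ∀ (char_row : String) (j : Int), Dom_get_num_and_y_loc char_row j → Pre_get_num_and_y_loc char_row j → Spec_get_num_and_y_loc char_row j (get_num_and_y_loc char_row j)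

-- ===== LEMMAS AND PROOFS =====

-- digit test at an absolute position (false out of range, since ' ' is not a digit)
def pvD (cs : List Char) (k : Nat) : Bool := (cs.getD k ' ').isDigit

lemma pvD_lt_len {cs : List Char} {k : Nat} (h : pvD cs k = true) : k < cs.length := by
  by_contra hk
  simp [pvD, List.getD_eq_getElem?_getD, List.getElem?_eq_none (by omega : cs.length ≤ k)] at h

lemma pvD_eq (cs : List Char) (n : Nat) :
    ((cs[n]?).map Char.isDigit).getD false = pvD cs n := by
  cases h : cs[n]? <;> simp [pvD, List.getD_eq_getElem?_getD, h]

-- Nat model of A's left loop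
def pvLa (cs : List Char) : Nat → Nat
  | 0 => 0
  | n + 1 => if pvD cs n then pvLa cs n else n + 1

lemma goLeft_eq (cs : List Char) (n : Nat) : pvGoLeft cs (n : Int) = (pvLa cs n : Int) := by
  induction n with
  | zero => rw [pvGoLeft]; simp [pvLa]
  | succ n ih =>
    rw [pvGoLeft]
    have h1 : ((n : Int) + 1) - 1 = (n : Int) := by ring
    simp only [Nat.cast_add, Nat.cast_one, h1, PySem.List.pyGet?_natCast, pvD_eq]
    by_cases hd : pvD cs n = true
    · simpa [hd, pvLa, (by positivity : (0:Int) < (n:Int) + 1)] using ih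
    · simp [hd, pvLa]

-- Nat model of A's right loop
def pvRa (cs : List Char) (n : Nat) : Nat :=
  if n + 1 < cs.length ∧ pvD cs (n + 1) then pvRa cs (n + 1) else n
termination_by cs.length - n
decreasing_by omega

lemma goRight_eq_aux (cs : List Char) : ∀ (k n : Nat), cs.length - n ≤ k →
    pvGoRight cs (n : Int) = (pvRa cs n : Int) := by
  intro k
  induction k with
  | zero =>
    intro n hn
    rw [pvGoRight, dif_neg (by rintro ⟨h1, -⟩; omega), pvRa,
        if_neg (by rintro ⟨h1, -⟩; omega)]
  | succ k ih =>
    intro n hn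
    have hcast : (n : Int) + 1 = ((n + 1 : Nat) : Int) := by push_cast; ring
    by_cases hc : n + 1 < cs.length ∧ pvD cs (n + 1) = true
    · obtain ⟨hlt, hd⟩ := hc
      rw [pvGoRight,
          dif_pos ⟨by omega, by rw [hcast, PySem.List.pyGet?_natCast, pvD_eq]; exact hd⟩,
          pvRa, if_pos ⟨hlt, hd⟩, hcast]
      exact ih (n + 1) (by omega)
    · rw [pvGoRight, dif_neg, pvRa, if_neg hc]
      rintro ⟨h1, h2⟩
      rw [hcast, PySem.List.pyGet?_natCast, pvD_eq] at h2
      exact hc ⟨by omega, h2⟩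

lemma goRight_eq (cs : List Char) (n : Nat) : pvGoRight cs (n : Int) = (pvRa cs n : Int) :=
  goRight_eq_aux cs (cs.length - n) n le_rfl

lemma la_unique (cs : List Char) (n : Nat) (s : Nat) (hle : s ≤ n)
    (hdig : ∀ k, s ≤ k → k < n → pvD cs k = true)
    (hbd : s = 0 ∨ pvD cs (s - 1) = false) : s = pvLa cs n := by
  induction n with
  | zero => simp only [pvLa]; omega
  | succ n ih =>
    by_cases hd : pvD cs n = true
    · rw [pvLa, if_pos hd]
      have hs : s ≤ n := by
        by_contra hgt
        have hsn : s = n + 1 := by omega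
        rcases hbd with h | h
        · omega
        · rw [hsn, Nat.add_sub_cancel] at h; rw [hd] at h; cases h
      exact ih hs (fun k hk1 hk2 => hdig k hk1 (by omega))
    · rw [pvLa, if_neg hd]
      by_contra hne
      exact hd (hdig n (by omega) (by omega))

lemma ra_unique (cs : List Char) (n : Nat) (e : Nat) (hlt : n < e) (hlen : e ≤ cs.length)
    (hdig : ∀ k, n < k → k < e → pvD cs k = true)
    (hbd : e = cs.length ∨ pvD cs e = false) : e = pvRa cs n + 1 := by
  fun_induction pvRa with
  | case1 n h ih =>
    have hne : e ≠ n + 1 := by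
      intro he
      rcases hbd with hb | hb
      · omega
      · rw [he] at hb; rw [h.2] at hb; cases hb
    exact ih (by omega) (fun k hk1 hk2 => hdig k (by omega) hk2)
  | case2 n h =>
    by_contra hne
    have h1 : n + 1 < e := by omega
    exact h ⟨by omega, hdig (n + 1) (by omega) h1⟩

-- a maximal digit run of cs
def pvRun (cs : List Char) (p : Nat × Nat) : Prop :=
  p.1 < p.2 ∧ (∀ k, p.1 ≤ k → k < p.2 → pvD cs k = true) ∧
  (p.1 = 0 ∨ pvD cs (p.1 - 1) = false) ∧ (p.2 = cs.length ∨ pvD cs p.2 = false)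

def pvInv (cs : List Char) (i : Nat) : Option Nat → Prop
  | none => i = 0 ∨ pvD cs (i - 1) = false
  | some s => s < i ∧ (∀ k, s ≤ k → k < i → pvD cs k = true) ∧ (s = 0 ∨ pvD cs (s - 1) = false)

lemma runs_sound (cs : List Char) :
    ∀ (rest : List Char) (i : Nat) (start : Option Nat), rest = cs.drop i → i ≤ cs.length →
      pvInv cs i start → ∀ p ∈ pvCollectRuns rest i start, pvRun cs p := by
  intro rest
  induction rest with
  | nil =>
    intro i start hdrop hle hinv p hp
    have hi : i = cs.length := by
      have := List.drop_eq_nil_iff.mp hdrop.symm; omega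
    cases start with
    | none => simp [pvCollectRuns] at hp
    | some s =>
      simp only [pvCollectRuns, List.mem_singleton] at hp
      subst hp
      obtain ⟨h1, h2, h3⟩ := hinv
      exact ⟨h1, h2, h3, Or.inl hi⟩
  | cons c rest ih =>
    intro i start hdrop hle hinv p hp
    have hi : cs[i]? = some c := by
      have h0 : (cs.drop i)[0]? = some c := by rw [← hdrop]; rfl
      simpa using h0
    have hilt : i < cs.length := (List.getElem?_eq_some_iff.mp hi).1
    have hD : pvD cs i = c.isDigit := by simp [pvD, List.getD_eq_getElem?_getD, hi]
    have hdrop' : rest = cs.drop (i + 1) := by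
      have h0 := congrArg List.tail hdrop
      simpa [List.tail_drop] using h0
    by_cases hc : c.isDigit = true
    · cases start with
      | none =>
        have hred : pvCollectRuns (c :: rest) i none = pvCollectRuns rest (i + 1) (some i) := by
          simp [pvCollectRuns, hc]
        rw [hred] at hp
        refine ih (i + 1) (some i) hdrop' (by omega) ?_ p hp
        exact ⟨by omega, fun k hk1 hk2 => by
          have : k = i := by omega
          subst this; rw [hD]; exact hc, hinv⟩
      | some s =>
        have hred : pvCollectRuns (c :: rest) i (some s) = pvCollectRuns rest (i + 1) (some s) := by
          simp [pvCollectRuns, hc]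
        rw [hred] at hp
        obtain ⟨h1, h2, h3⟩ := hinv
        refine ih (i + 1) (some s) hdrop' (by omega) ?_ p hp
        exact ⟨by omega, fun k hk1 hk2 => by
          rcases Nat.lt_or_ge k i with h' | h'
          · exact h2 k hk1 h'
          · have : k = i := by omega
            subst this; rw [hD]; exact hc, h3⟩
    · have hDf : pvD cs i = false := by rw [hD]; simpa using hc
      cases start with
      | none =>
        have hred : pvCollectRuns (c :: rest) i none = pvCollectRuns rest (i + 1) none := by
          simp [pvCollectRuns, hc]
        rw [hred] at hp
        exact ih (i + 1) none hdrop' (by omega) (Or.inr (by simpa using hDf)) p hp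
      | some s =>
        have hred : pvCollectRuns (c :: rest) i (some s) =
            (s, i) :: pvCollectRuns rest (i + 1) none := by
          simp [pvCollectRuns, hc]
        rw [hred] at hp
        obtain ⟨h1, h2, h3⟩ := hinv
        rcases List.mem_cons.mp hp with hp | hp
        · subst hp
          exact ⟨h1, h2, h3, Or.inr hDf⟩
        · exact ih (i + 1) none hdrop' (by omega) (Or.inr (by simpa using hDf)) p hp

lemma runs_cover (cs : List Char) :
    ∀ (rest : List Char) (i : Nat) (start : Option Nat) (j : Nat), rest = cs.drop i →
      i ≤ cs.length → pvD cs j = true →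
      (match start with | none => i ≤ j | some s => s ≤ j) →
      ∃ p ∈ pvCollectRuns rest i start, p.1 ≤ j ∧ j < p.2 := by
  intro rest
  induction rest with
  | nil =>
    intro i start j hdrop hle hdj hs
    have hi : i = cs.length := by
      have := List.drop_eq_nil_iff.mp hdrop.symm; omega
    have hjlt : j < cs.length := pvD_lt_len hdj
    cases start with
    | none => exact absurd hjlt (by omega)
    | some s => exact ⟨(s, i), by simp [pvCollectRuns], hs, by omega⟩
  | cons c rest ih =>
    intro i start j hdrop hle hdj hs
    have hi : cs[i]? = some c := by
      have h0 : (cs.drop i)[0]? = some c := by rw [← hdrop]; rfl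
      simpa using h0
    have hilt : i < cs.length := (List.getElem?_eq_some_iff.mp hi).1
    have hD : pvD cs i = c.isDigit := by simp [pvD, List.getD_eq_getElem?_getD, hi]
    have hdrop' : rest = cs.drop (i + 1) := by
      have h0 := congrArg List.tail hdrop
      simpa [List.tail_drop] using h0
    by_cases hc : c.isDigit = true
    · cases start with
      | none =>
        have hred : pvCollectRuns (c :: rest) i none = pvCollectRuns rest (i + 1) (some i) := by
          simp [pvCollectRuns, hc]
        rw [hred]
        exact ih (i + 1) (some i) j hdrop' (by omega) hdj hs
      | some s =>
        have hred : pvCollectRuns (c :: rest) i (some s) = pvCollectRuns rest (i + 1) (some s) := by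
          simp [pvCollectRuns, hc]
        rw [hred]
        exact ih (i + 1) (some s) j hdrop' (by omega) hdj hs
    · have hDf : pvD cs i = false := by rw [hD]; simpa using hc
      have hji : j ≠ i := by intro h; rw [h, hDf] at hdj; cases hdj
      cases start with
      | none =>
        have hred : pvCollectRuns (c :: rest) i none = pvCollectRuns rest (i + 1) none := by
          simp [pvCollectRuns, hc]
        rw [hred]
        exact ih (i + 1) none j hdrop' (by omega) hdj (by simp; omega)
      | some s =>
        have hred : pvCollectRuns (c :: rest) i (some s) =
            (s, i) :: pvCollectRuns rest (i + 1) none := by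
          simp [pvCollectRuns, hc]
        rw [hred]
        by_cases hj : j < i
        · exact ⟨(s, i), List.mem_cons_self, hs, hj⟩
        · obtain ⟨p, hp, hcov⟩ := ih (i + 1) none j hdrop' (by omega) hdj (by simp; omega)
          exact ⟨p, List.mem_cons_of_mem _ hp, hcov⟩

lemma findRun_spec (j : Int) :
    ∀ l : List (Nat × Nat), (∃ p ∈ l, (p.1 : Int) ≤ j ∧ j < (p.2 : Int)) →
      ∃ p, pvFindRun l j = some p ∧ p ∈ l ∧ (p.1 : Int) ≤ j ∧ j < (p.2 : Int) := by
  intro l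
  induction l with
  | nil => rintro ⟨p, hp, -⟩; cases hp
  | cons q rest ih =>
    rintro ⟨p, hp, hcov⟩
    obtain ⟨s, e⟩ := q
    by_cases hq : (s : Int) ≤ j ∧ j < (e : Int)
    · exact ⟨(s, e), by simp [pvFindRun, hq], List.mem_cons_self, hq.1, hq.2⟩
    · rcases List.mem_cons.mp hp with rfl | hp
      · exact absurd hcov hq
      · obtain ⟨p', h1, h2, h3⟩ := ih ⟨p, hp, hcov⟩
        exact ⟨p', by simp [pvFindRun, hq, h1], List.mem_cons_of_mem _ h2, h3⟩

-- ===== VERDICT (by name: the statement is the Claim_ definition above) =====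
theorem get_num_and_y_loc_spec : Claim_equal_get_num_and_y_loc := by
  intro char_row j hdom hpre
  unfold Spec_get_num_and_y_loc
  simp only [get_num_and_y_loc, get_num_and_y_loc_alt]
  unfold Pre_get_num_and_y_loc at hpre
  generalize char_row.toList = cs at hpre ⊢
  obtain ⟨hj0, hjlt, hdig⟩ := hpre
  have hjn : j = (j.toNat : Int) := by omega
  have hnlt : j.toNat < cs.length := by omega
  have hdn : pvD cs j.toNat = true := hdig
  obtain ⟨p, hmem, hc1, hc2⟩ :=
    runs_cover cs cs 0 none j.toNat (by simp) (by omega) hdn (Nat.zero_le _)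
  obtain ⟨⟨s, e⟩, hfind, hfmem, hf1, hf2⟩ :=
    findRun_spec j (pvCollectRuns cs 0 none) ⟨p, hmem, by omega, by omega⟩
  obtain ⟨hlt, hdigs, hlb, hrb⟩ :=
    runs_sound cs cs 0 none (by simp) (by omega) (Or.inl rfl) (s, e) hfmem
  have hs1 : s ≤ j.toNat := by omega
  have hs2 : j.toNat < e := by omega
  have h1 : s = pvLa cs j.toNat :=
    la_unique cs j.toNat s hs1 (fun k hk1 hk2 => hdigs k hk1 (by omega)) hlb
  have he_le : e ≤ cs.length := by
    have hd1 := hdigs (e - 1) (by omega) (by omega)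
    have := pvD_lt_len hd1; omega
  have h2 : e = pvRa cs j.toNat + 1 :=
    ra_unique cs j.toNat e hs2 he_le (fun k hk1 hk2 => hdigs k (by omega) hk2) hrb
  rw [hfind, hjn, goLeft_eq, goRight_eq, ← h1]
  have hcast : ((pvRa cs j.toNat : Int) + 1) = (e : Int) := by omega
  rw [hcast]
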